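-- pv_equiv track=rewrite | github.com/xosski/OFSP | HAdes/api_testing_harvester.py | detect_edge
-- ===== SOURCE A (Python) =====
-- from typing import Dict, List, Any, Optional, Tuple
--
-- def detect_edge(response_headers: Dict) -> bool:
--     """Detect if response came through edge/CDN"""
--     headers_lower = {k.lower(): v for k, v in response_headers.items()}
--
--     edge_indicators = ['cf-', 'x-akamai', 'via:', 'x-cdn', 'x-edge', 'server: cloudflare']
--
--     for key, value in headers_lower.items():
--         for indicator in edge_indicators:
--             if indicator in f"{key}: {value}".lower():
--                 return True
--
--     return False
-- ===== SOURCE B (Python) =====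
-- def detect_edge(response_headers) -> bool:
--     """Detect if response came through edge/CDN"""
--     headers_lower = {k.lower(): v for k, v in response_headers.items()}
--
--     edge_indicators = ['cf-', 'x-akamai', 'via:', 'x-cdn', 'x-edge', 'server: cloudflare']
--
--     # index the patterns by their first character once
--     by_first = {}
--     for ind in edge_indicators:
--         by_first.setdefault(ind[0], []).append(ind)
--
--     # single left-to-right scan of each line: at each position, only the
--     # patterns whose first character matches are tried (naive multi-pattern matching)
--     for key, value in headers_lower.items():
--         text = f"{key}: {value}".lower()
--         for i, ch in enumerate(text):
--             for ind in by_first.get(ch, []):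
--                 if text.startswith(ind, i):
--                     return True
--     return False
-- ===== Notes on version B (the rewrite author's own statement) =====
-- stated objective: alternative
-- what changed: A tests each of the six indicators against each header line with a separate substring search; B instead builds a dict indexing the indicators by their first character and makes a single left-to-right scan of each lowercased 'key: value' line, trying at each position only the indicators filed under that character (naive multi-pattern matching with first-character dispatch).
import Mathlib
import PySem

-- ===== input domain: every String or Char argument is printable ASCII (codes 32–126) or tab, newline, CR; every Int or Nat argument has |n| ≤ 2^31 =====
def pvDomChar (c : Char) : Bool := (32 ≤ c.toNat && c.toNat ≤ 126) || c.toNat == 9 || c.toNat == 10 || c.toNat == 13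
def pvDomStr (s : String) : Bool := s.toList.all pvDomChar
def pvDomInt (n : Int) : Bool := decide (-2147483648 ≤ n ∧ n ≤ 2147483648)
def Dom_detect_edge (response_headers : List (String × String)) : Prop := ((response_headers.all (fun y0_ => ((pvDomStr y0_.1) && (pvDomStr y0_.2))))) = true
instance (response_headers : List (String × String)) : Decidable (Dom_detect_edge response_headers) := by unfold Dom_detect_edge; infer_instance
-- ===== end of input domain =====

-- B replaces A's per-indicator substring searches by one left-to-right scan of each header line
-- that tries, at each position, only the indicators indexed by their first character (alternative algorithm).

-- shared helpers: both Pythons build the same lowercased-key dict and format "key: value" lines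
def edgeIndicators : List String :=
  ["cf-", "x-akamai", "via:", "x-cdn", "x-edge", "server: cloudflare"]

def headersLower (response_headers : List (String × String)) : PySem.Dict String String :=
  response_headers.foldl (fun d kv => d.insert (PySem.Str.lower kv.1) kv.2) PySem.Dict.empty

-- f"{key}: {value}" as a character list
def lineChars (kv : String × String) : List Char :=
  kv.1.toList ++ [':', ' '] ++ kv.2.toList

-- ===== PORT A =====
def detect_edge (response_headers : List (String × String)) : Bool :=
  (headersLower response_headers).items.any (fun kv =>
    edgeIndicators.any (fun ind =>
      PySem.Chars.isIn ind.toList (PySem.Chars.lower (lineChars kv))))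

-- ===== PORT B =====
-- by_first: indicators indexed by their first character (setdefault+append = fetch-or-[] then append;
-- ind[0] is ind.toList.headD ' ': exact here since every indicator literal is nonempty)
def byFirst : PySem.Dict Char (List String) :=
  edgeIndicators.foldl (fun d ind =>
    d.insert (ind.toList.headD ' ') (d.getD (ind.toList.headD ' ') [] ++ [ind])) PySem.Dict.empty

-- "for i, ch in enumerate(text): for ind in by_first.get(ch, []): if text.startswith(ind, i)"
-- as structural recursion on the remaining suffix of text
def scanFrom (t : List Char) : Bool :=
  match t with
  | [] => false
  | c :: rest =>
      (byFirst.getD c []).any (fun ind => PySem.Chars.startswith (c :: rest) ind.toList)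
      || scanFrom rest

def detect_edge_alt (response_headers : List (String × String)) : Bool :=
  (headersLower response_headers).items.any (fun kv =>
    scanFrom (PySem.Chars.lower (lineChars kv)))

-- ===== PRECONDITION & SPEC =====
def Spec_detect_edge (response_headers : List (String × String)) (out : Bool) : Prop := out = detect_edge_alt response_headers
instance (response_headers : List (String × String)) (out : Bool) : Decidable (Spec_detect_edge response_headers out) := by unfold Spec_detect_edge; infer_instance

-- ===== CLAIM =====
def Claim_equal_detect_edge : Prop := ∀ (response_headers : List (String × String)), Dom_detect_edge response_headers → Spec_detect_edge response_headers (detect_edge response_headers)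

-- ===== LEMMAS AND PROOFS =====

-- first-character dispatch is exhaustive: trying only the indicators filed under c
-- tests the same positions as trying all of them (others fail startswith immediately)
lemma any_byFirst (c : Char) (rest : List Char) :
    (byFirst.getD c []).any (fun ind => PySem.Chars.startswith (c :: rest) ind.toList)
      = edgeIndicators.any (fun ind => PySem.Chars.startswith (c :: rest) ind.toList) := by
  have hb : byFirst = PySem.Dict.mk
      [('c', ["cf-"]), ('x', ["x-akamai", "x-cdn", "x-edge"]),
       ('v', ["via:"]), ('s', ["server: cloudflare"])] := by decide
  rw [hb]
  simp only [PySem.Dict.getD_eq_get?_getD, PySem.Dict.get?_mk_cons, edgeIndicators]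
  split_ifs with h1 h2 h3 h4
  · rcases beq_iff_eq.mp h1 with rfl
    simp [PySem.Chars.startswith, List.isPrefixOf]
  · rcases beq_iff_eq.mp h2 with rfl
    simp [PySem.Chars.startswith, List.isPrefixOf]
  · rcases beq_iff_eq.mp h3 with rfl
    simp [PySem.Chars.startswith, List.isPrefixOf]
  · rcases beq_iff_eq.mp h4 with rfl
    simp [PySem.Chars.startswith, List.isPrefixOf]
  · simp_all [PySem.Chars.startswith, List.isPrefixOf, PySem.Dict.get?]

lemma isIn_cons (sub : List Char) (c : Char) (rest : List Char) :
    PySem.Chars.isIn sub (c :: rest)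
      = (PySem.Chars.startswith (c :: rest) sub || PySem.Chars.isIn sub rest) := by
  refine Bool.eq_iff_iff.mpr ?_
  simp only [Bool.or_eq_true, PySem.Chars.isIn_iff_infix, PySem.Chars.startswith,
    List.isPrefixOf_iff_prefix, List.infix_cons_iff]

lemma scanFrom_eq (t : List Char) :
    scanFrom t = edgeIndicators.any (fun ind => PySem.Chars.isIn ind.toList t) := by
  induction t with
  | nil => decide
  | cons c rest ih =>
    rw [scanFrom, any_byFirst, ih]
    simp only [isIn_cons]
    refine Bool.eq_iff_iff.mpr ?_
    simp only [List.any_eq_true, Bool.or_eq_true]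
    constructor
    · rintro (⟨x, hx, h⟩ | ⟨x, hx, h⟩)
      exacts [⟨x, hx, Or.inl h⟩, ⟨x, hx, Or.inr h⟩]
    · rintro ⟨x, hx, h | h⟩
      exacts [Or.inl ⟨x, hx, h⟩, Or.inr ⟨x, hx, h⟩]

-- ===== VERDICT =====
theorem detect_edge_spec : Claim_equal_detect_edge := by
  intro rh _
  unfold Spec_detect_edge detect_edge detect_edge_alt
  simp only [scanFrom_eq]
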